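-- pv_equiv track=rewrite | github.com/tilaboy/work_note | algorithms/notes/ch15/questions/palindrome.py | lcs_bu
-- ===== SOURCE A (Python) =====
-- def lcs_bu(s, k):
--     lcs_m = [[None] * len(s) for _ in range(len(s))]
--     for i in range(len(s)):
--         lcs_m[i][k] = s[k]
--         lcs_m[k][i] = s[k]
--     for i in range(k -1 , -1, -1):
--         for j in range(k + 1, len(s), 1):
--             if s[i] == s[j]:
--                 lcs_m[i][j] = s[i] + lcs_m[i+1][j-1] + s[j]
--             else:
--                 if len(lcs_m[i][j-1]) > len(lcs_m[i+1][j]):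
--                     lcs_m[i][j] = lcs_m[i][j-1]
--                 else:
--                     lcs_m[i][j] = lcs_m[i+1][j]
--     return lcs_m
-- ===== SOURCE B (Python) =====
-- def lcs_bu(s, k):
--     n = len(s)
--     lcs_m = [[None] * n for _ in range(n)]
--     for i in range(n):
--         lcs_m[i][k] = s[k]
--         lcs_m[k][i] = s[k]
--
--     def solve(i, j):
--         memo = lcs_m[i][j]
--         if memo is not None:
--             return memo
--         if s[i] == s[j]:
--             res = s[i] + solve(i + 1, j - 1) + s[j]
--         else:
--             a = solve(i, j - 1)
--             b = solve(i + 1, j)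
--             res = a if len(a) > len(b) else b
--         lcs_m[i][j] = res
--         return res
--
--     for i in range(k - 1, -1, -1):
--         for j in range(k + 1, n):
--             solve(i, j)
--     return lcs_m
-- ===== Notes on version B (the rewrite author's own statement) =====
-- stated objective: alternative
-- what changed: Replaces A's bottom-up double-loop DP fill with a top-down memoized recursive solver that writes into the same matrix; the base row/column-k initialization and the strict '>' tie-break are kept.
import Mathlib
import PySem

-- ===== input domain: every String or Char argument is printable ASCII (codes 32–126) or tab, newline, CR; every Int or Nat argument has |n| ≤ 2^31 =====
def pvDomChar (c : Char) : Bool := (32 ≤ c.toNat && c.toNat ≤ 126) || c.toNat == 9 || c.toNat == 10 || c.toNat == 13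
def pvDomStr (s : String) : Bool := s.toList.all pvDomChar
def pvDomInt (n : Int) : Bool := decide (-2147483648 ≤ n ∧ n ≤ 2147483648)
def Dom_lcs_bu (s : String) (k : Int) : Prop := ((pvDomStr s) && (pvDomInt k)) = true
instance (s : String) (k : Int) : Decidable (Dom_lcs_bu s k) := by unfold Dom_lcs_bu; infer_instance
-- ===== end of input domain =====

-- B replaces A's bottom-up double-loop DP fill with a top-down memoized recursive solver writing
-- into the same matrix (objective: alternative decomposition; no speed claim).

-- ===== PORT A =====
-- Helpers for Python subscripting shared by both ports (this subscript/assignment code, and the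
-- whole base initialization loop, appear verbatim in both Python versions).

-- m[i][j] (Python negative-index rule via pyGetD; the default is unreachable under Pre_)
def pvCell (m : List (List (Option String))) (i j : Int) : Option String :=
  PySem.List.pyGetD (PySem.List.pyGetD m i []) j none

-- Python uses the cell as a str (None there would be a TypeError, unreachable under Pre_)
def pvCellStr (m : List (List (Option String))) (i j : Int) : String :=
  (pvCell m i j).getD ""

-- m[i][j] = v (Python negative-index rule; out-of-range indices are unreachable under Pre_)
def pvSetCell (m : List (List (Option String))) (i j : Int) (v : Option String) :
    List (List (Option String)) :=
  PySem.List.pySetD m i (PySem.List.pySetD (PySem.List.pyGetD m i []) j v)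

-- s[i]: the one-character string (the default is unreachable under Pre_)
def pvChar (s : String) (i : Int) : String :=
  String.ofList [PySem.List.pyGetD s.toList i ' ']

def lcs_bu (s : String) (k : Int) : List (List (Option String)) :=
  let n : Int := (s.toList.length : Int)
  let m0 : List (List (Option String)) :=
    List.replicate s.toList.length (List.replicate s.toList.length (none : Option String))
  let m1 := (PySem.List.pyRange 0 n 1).foldl
    (fun m i => pvSetCell (pvSetCell m i k (some (pvChar s k))) k i (some (pvChar s k))) m0
  (PySem.List.pyRange (k - 1) (-1) (-1)).foldl (fun m i =>
    (PySem.List.pyRange (k + 1) n 1).foldl (fun m j =>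
      if pvChar s i = pvChar s j then
        pvSetCell m i j (some (pvChar s i ++ pvCellStr m (i + 1) (j - 1) ++ pvChar s j))
      else
        if PySem.Str.len (pvCellStr m i (j - 1)) > PySem.Str.len (pvCellStr m (i + 1) j) then
          pvSetCell m i j (some (pvCellStr m i (j - 1)))
        else
          pvSetCell m i j (some (pvCellStr m (i + 1) j))) m) m1

-- ===== PORT B =====
-- solve(i, j): top-down memoized recursion writing into the matrix; the fuel argument only makes
-- the recursion structural in Lean (the driver supplies ample fuel; fuel 0 is never reached
-- under Pre_).
def pvSolve (s : String) :
    Nat → List (List (Option String)) → Int → Int → String × List (List (Option String))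
  | 0, m, i, j => (pvCellStr m i j, m)
  | fuel + 1, m, i, j =>
    match pvCell m i j with
    | some v => (v, m)
    | none =>
      if pvChar s i = pvChar s j then
        let r := pvSolve s fuel m (i + 1) (j - 1)
        let res := pvChar s i ++ r.1 ++ pvChar s j
        (res, pvSetCell r.2 i j (some res))
      else
        let a := pvSolve s fuel m i (j - 1)
        let b := pvSolve s fuel a.2 (i + 1) j
        let res := if PySem.Str.len a.1 > PySem.Str.len b.1 then a.1 else b.1
        (res, pvSetCell b.2 i j (some res))

def lcs_bu_alt (s : String) (k : Int) : List (List (Option String)) :=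
  let n : Int := (s.toList.length : Int)
  let m0 : List (List (Option String)) :=
    List.replicate s.toList.length (List.replicate s.toList.length (none : Option String))
  let m1 := (PySem.List.pyRange 0 n 1).foldl
    (fun m i => pvSetCell (pvSetCell m i k (some (pvChar s k))) k i (some (pvChar s k))) m0
  (PySem.List.pyRange (k - 1) (-1) (-1)).foldl (fun m i =>
    (PySem.List.pyRange (k + 1) n 1).foldl (fun m j =>
      (pvSolve s s.toList.length m i j).2) m) m1

-- ===== PRECONDITION & SPEC =====
-- Pre_ excludes exactly the inputs where A raises IndexError (s nonempty and k outside
-- [-len(s), len(s)-1]); B raises there as well.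
def Pre_lcs_bu (s : String) (k : Int) : Prop :=
  s.toList.length = 0 ∨ (-(s.toList.length : Int) ≤ k ∧ k < (s.toList.length : Int))
instance (s : String) (k : Int) : Decidable (Pre_lcs_bu s k) := by unfold Pre_lcs_bu; infer_instance

def pvWitness_lcs_bu : String × Int := ("abcba", 2)

def Spec_lcs_bu (s : String) (k : Int) (out : List (List (Option String))) : Prop := out = lcs_bu_alt s k
instance (s : String) (k : Int) (out : List (List (Option String))) : Decidable (Spec_lcs_bu s k out) := by unfold Spec_lcs_bu; infer_instance

-- ===== CLAIM (what is proved, stated in full; the proofs are below) =====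
def Claim_equal_lcs_bu : Prop := ∀ (s : String) (k : Int), Dom_lcs_bu s k → Pre_lcs_bu s k → Spec_lcs_bu s k (lcs_bu s k)

-- ===== LEMMAS AND PROOFS =====

def pvGet2 (m : List (List (Option String))) (i j : Nat) : Option String :=
  (m.getD i []).getD j none
def pvSet2 (m : List (List (Option String))) (i j : Nat) (v : Option String) :
    List (List (Option String)) :=
  m.set i ((m.getD i []).set j v)

theorem getD_lt {α : Type} (xs : List α) (i : Nat) (d : α) (h : i < xs.length) : xs.getD i d = xs[i] := by
  rw [List.getD_eq_getElem?_getD, List.getElem?_eq_getElem h]; rfl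

theorem getD_ge {α : Type} (xs : List α) (i : Nat) (d : α) (h : xs.length ≤ i) : xs.getD i d = d := by
  rw [List.getD_eq_getElem?_getD, List.getElem?_eq_none h]; rfl

theorem pvGet2_pvSet2 (m : List (List (Option String))) (i j a b : Nat) (v : Option String)
    (n : Nat) (hrows : ∀ r ∈ m, r.length = n) (hi : i < m.length) (hj : j < n) :
    pvGet2 (pvSet2 m i j v) a b = if a = i ∧ b = j then v else pvGet2 m a b := by
  unfold pvGet2 pvSet2
  by_cases halen : a < m.length
  · have houter : (m.set i ((m.getD i []).set j v)).getD a [] =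
        if i = a then (m.getD i []).set j v else m.getD a [] := by
      rw [getD_lt _ _ _ (by simpa using halen), List.getElem_set]
      by_cases ha : i = a
      · simp [ha]
      · rw [if_neg ha, if_neg ha, getD_lt _ _ _ halen]
    rw [houter]
    by_cases ha : a = i
    · subst ha
      rw [if_pos rfl]
      have hjlen : j < (m.getD a []).length := by
        rw [getD_lt _ _ _ hi, hrows _ (List.getElem_mem hi)]; exact hj
      by_cases hb : b = j
      · subst hb
        rw [if_pos ⟨rfl, rfl⟩, getD_lt _ _ _ (by simpa using hjlen)]
        exact List.getElem_set_self (by simpa using hjlen)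
      · rw [if_neg (by tauto)]
        by_cases hblen : b < (m.getD a []).length
        · rw [getD_lt _ _ _ (by simpa using hblen), getD_lt _ _ _ hblen]
          exact List.getElem_set_ne (by omega) (by simpa using hblen)
        · rw [getD_ge _ _ _ (by simpa using (by omega : (m.getD a []).length ≤ b)),
              getD_ge _ _ _ (by omega)]
    · rw [if_neg (Ne.symm ha), if_neg (by tauto)]
  · rw [getD_ge ((m.set i ((m.getD i []).set j v))) a [] (by simpa using (by omega : m.length ≤ a)),
        getD_ge m a [] (by omega), if_neg (by rintro ⟨rfl, rfl⟩; omega)]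

def pvVal (cs : List Char) (kn : Nat) (i j : Nat) : String :=
  if i = kn ∨ j = kn then String.ofList [cs.getD kn ' ']
  else if h : i < j then
    (if String.ofList [cs.getD i ' '] = String.ofList [cs.getD j ' '] then
      String.ofList [cs.getD i ' '] ++ pvVal cs kn (i + 1) (j - 1) ++ String.ofList [cs.getD j ' ']
    else if PySem.Str.len (pvVal cs kn i (j - 1)) > PySem.Str.len (pvVal cs kn (i + 1) j) then
      pvVal cs kn i (j - 1)
    else pvVal cs kn (i + 1) j)
  else ""
termination_by j - i
decreasing_by all_goals omega

theorem pvVal_base (cs : List Char) (kn i j : Nat) (h : i = kn ∨ j = kn) :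
    pvVal cs kn i j = String.ofList [cs.getD kn ' '] := by
  rw [pvVal, if_pos h]

theorem pvVal_region (cs : List Char) (kn i j : Nat) (h1 : i < kn) (h2 : kn < j) :
    pvVal cs kn i j =
      if String.ofList [cs.getD i ' '] = String.ofList [cs.getD j ' '] then
        String.ofList [cs.getD i ' '] ++ pvVal cs kn (i + 1) (j - 1) ++ String.ofList [cs.getD j ' ']
      else if PySem.Str.len (pvVal cs kn i (j - 1)) > PySem.Str.len (pvVal cs kn (i + 1) j) then
        pvVal cs kn i (j - 1)
      else pvVal cs kn (i + 1) j := by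
  rw [pvVal, if_neg (by omega), dif_pos (by omega)]

theorem pvGetD_nonneg {α : Type} (xs : List α) (i : Int) (d : α) (h : 0 ≤ i) :
    PySem.List.pyGetD xs i d = xs.getD i.toNat d := by
  unfold PySem.List.pyGetD PySem.List.pyGet? PySem.List.pyIdx?
  rw [if_pos h]
  by_cases hlt : i < (xs.length : Int)
  · rw [if_pos hlt]
    simp [List.getD_eq_getElem?_getD, List.getElem?_eq_getElem (show i.toNat < xs.length by omega)]
  · rw [if_neg hlt]
    simp [List.getD_eq_getElem?_getD, List.getElem?_eq_none (show xs.length ≤ i.toNat by omega)]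

theorem pvCell_eq (m : List (List (Option String))) (i j : Int) (hi : 0 ≤ i) (hj : 0 ≤ j) :
    pvCell m i j = pvGet2 m i.toNat j.toNat := by
  unfold pvCell pvGet2
  rw [pvGetD_nonneg _ _ _ hi, pvGetD_nonneg _ _ _ hj]

theorem pvSetCell_eq (m : List (List (Option String))) (i j : Int) (v : Option String)
    (hi : 0 ≤ i) (hj : 0 ≤ j) :
    pvSetCell m i j v = pvSet2 m i.toNat j.toNat v := by
  unfold pvSetCell pvSet2
  rw [pvGetD_nonneg _ _ _ hi, PySem.List.pySetD_of_nonneg _ _ hj, PySem.List.pySetD_of_nonneg _ _ hi]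

theorem pvChar_eq (s : String) (i : Int) (hi : 0 ≤ i) :
    pvChar s i = String.ofList [s.toList.getD i.toNat ' '] := by
  unfold pvChar; rw [pvGetD_nonneg _ _ _ hi]

-- the matrix picture: base row/column kn holds s[kn]; region cells described by `fill` hold
-- the DP value; everything else is still None
def pvPic (cs : List Char) (n kn : Nat) (fill : Nat → Nat → Bool)
    (m : List (List (Option String))) : Prop :=
  m.length = n ∧ (∀ r ∈ m, r.length = n) ∧
  ∀ a b : Nat, a < n → b < n →
    pvGet2 m a b =
      if a = kn ∨ b = kn then some (String.ofList [cs.getD kn ' '])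
      else if a < kn ∧ kn < b ∧ fill a b then some (pvVal cs kn a b) else none

theorem pvPic_congr (cs : List Char) (n kn : Nat) (f g : Nat → Nat → Bool)
    (m : List (List (Option String)))
    (h : ∀ a b, a < n → b < n → a < kn → kn < b → (f a b = g a b)) :
    pvPic cs n kn f m → pvPic cs n kn g m := by
  rintro ⟨h1, h2, h3⟩
  refine ⟨h1, h2, fun a b ha hb => ?_⟩
  rw [h3 a b ha hb]
  by_cases hbase : a = kn ∨ b = kn
  · simp [hbase]
  · rw [if_neg hbase, if_neg hbase]
    by_cases hreg : a < kn ∧ kn < b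
    · rw [h a b ha hb hreg.1 hreg.2]
    · rw [if_neg (by tauto), if_neg (by tauto)]

theorem pvPic_read (cs : List Char) (n kn : Nat) (fill : Nat → Nat → Bool)
    (m : List (List (Option String))) (hpic : pvPic cs n kn fill m)
    (a b : Nat) (ha : a < n) (hb : b < n)
    (h : a = kn ∨ b = kn ∨ (a < kn ∧ kn < b ∧ fill a b)) :
    pvGet2 m a b = some (pvVal cs kn a b) := by
  rw [hpic.2.2 a b ha hb]
  by_cases hbase : a = kn ∨ b = kn
  · rw [if_pos hbase, pvVal_base cs kn a b hbase]
  · rw [if_neg hbase, if_pos (by tauto)]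

theorem pvPic_none (cs : List Char) (n kn : Nat) (fill : Nat → Nat → Bool)
    (m : List (List (Option String))) (hpic : pvPic cs n kn fill m)
    (a b : Nat) (ha : a < n) (hb : b < n)
    (h1 : ¬(a = kn ∨ b = kn)) (h2 : ¬(a < kn ∧ kn < b ∧ fill a b = true)) :
    pvGet2 m a b = none := by
  rw [hpic.2.2 a b ha hb, if_neg h1, if_neg h2]

def pvBasePic (cs : List Char) (n kn t : Nat) (m : List (List (Option String))) : Prop :=
  m.length = n ∧ (∀ r ∈ m, r.length = n) ∧
  ∀ a b : Nat, a < n → b < n →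
    pvGet2 m a b =
      if (b = kn ∧ a < t) ∨ (a = kn ∧ b < t) then some (String.ofList [cs.getD kn ' ']) else none

theorem pvSet2_length (m : List (List (Option String))) (i j : Nat) (v : Option String) :
    (pvSet2 m i j v).length = m.length := by
  unfold pvSet2; simp

theorem pvSet2_rows (m : List (List (Option String))) (i j : Nat) (v : Option String)
    (n : Nat) (h : ∀ r ∈ m, r.length = n) (hi : i < m.length) :
    ∀ r ∈ pvSet2 m i j v, r.length = n := by
  intro r hr
  rcases List.mem_or_eq_of_mem_set hr with h1 | h1
  · exact h r h1
  · subst h1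
    rw [List.length_set, getD_lt _ _ _ hi]
    exact h _ (List.getElem_mem hi)

theorem pvBase_start (cs : List Char) (n kn : Nat) :
    pvBasePic cs n kn 0 (List.replicate n (List.replicate n (none : Option String))) := by
  refine ⟨by simp, by intro r hr; rw [List.eq_of_mem_replicate hr]; simp, fun a b ha hb => ?_⟩
  rw [if_neg (by omega)]
  unfold pvGet2
  have h1 : (List.replicate n (List.replicate n (none : Option String))).getD a [] =
      List.replicate n (none : Option String) := by
    rw [getD_lt _ _ _ (by simpa using ha)]
    exact List.getElem_replicate _
  rw [h1, getD_lt _ _ _ (by simpa using hb)]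
  exact List.getElem_replicate _

theorem pvBase_step (s : String) (k : Int) (n kn : Nat) (t : Int)
    (hk : k = (kn : Int)) (hkn : kn < n) (ht : 0 ≤ t) (htn : t < (n : Int))
    (m : List (List (Option String))) (hm : pvBasePic s.toList n kn t.toNat m) :
    pvBasePic s.toList n kn (t.toNat + 1)
      (pvSetCell (pvSetCell m t k (some (pvChar s k))) k t (some (pvChar s k))) := by
  obtain ⟨hlen, hrows, hget⟩ := hm
  have hkn0 : (0:Int) ≤ k := by omega
  have hktn : k.toNat = kn := by omega
  rw [pvSetCell_eq _ _ _ _ ht hkn0, pvSetCell_eq _ _ _ _ hkn0 ht, hktn]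
  set v := some (pvChar s k) with hv
  have hveq : v = some (String.ofList [s.toList.getD kn ' ']) := by
    rw [hv, pvChar_eq _ _ hkn0, hktn]
  have h1len : (pvSet2 m t.toNat kn v).length = n := by rw [pvSet2_length, hlen]
  have h1rows : ∀ r ∈ pvSet2 m t.toNat kn v, r.length = n :=
    pvSet2_rows m _ _ v n hrows (by omega)
  refine ⟨by rw [pvSet2_length, h1len], pvSet2_rows _ _ _ v n h1rows (by omega),
    fun a b ha hb => ?_⟩
  rw [pvGet2_pvSet2 _ _ _ _ _ _ n h1rows (by omega) (by omega),
      pvGet2_pvSet2 _ _ _ _ _ _ n hrows (by omega) (by omega), hget a b ha hb]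
  rw [hveq]
  split_ifs <;> first | rfl | omega

theorem pvBase_loop (s : String) (k : Int) (n kn : Nat)
    (hk : k = (kn : Int)) (hkn : kn < n) (fuel : Nat) :
    ∀ (t : Int) (m : List (List (Option String))),
      ((n : Int) - t).toNat ≤ fuel → 0 ≤ t → t ≤ (n : Int) →
      pvBasePic s.toList n kn t.toNat m →
      pvBasePic s.toList n kn n
        ((PySem.List.pyRange t (n : Int) 1).foldl
          (fun m i => pvSetCell (pvSetCell m i k (some (pvChar s k))) k i (some (pvChar s k))) m) := by
  induction fuel with
  | zero =>
    intro t m hfuel ht0 htn hm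
    rw [PySem.List.pyRange_one_eq_nil (by omega), List.foldl_nil]
    have he : t.toNat = n := by omega
    rwa [he] at hm
  | succ f ih =>
    intro t m hfuel ht0 htn hm
    by_cases hend : (n : Int) ≤ t
    · rw [PySem.List.pyRange_one_eq_nil hend, List.foldl_nil]
      have he : t.toNat = n := by omega
      rwa [he] at hm
    · rw [PySem.List.pyRange_one_cons (by omega), List.foldl_cons]
      have hstep := pvBase_step s k n kn t hk hkn ht0 (by omega) m hm
      have he : (t + 1).toNat = t.toNat + 1 := by omega
      exact ih (t + 1) _ (by omega) (by omega) (by omega) (by rwa [he])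

theorem pvBase_to_pic (cs : List Char) (n kn : Nat) (m : List (List (Option String)))
    (hm : pvBasePic cs n kn n m) :
    pvPic cs n kn (fun _ _ => false) m := by
  obtain ⟨h1, h2, h3⟩ := hm
  refine ⟨h1, h2, fun a b ha hb => ?_⟩
  rw [h3 a b ha hb]
  split_ifs <;> first | rfl | omega | tauto

def pvFillIn (i u : Int) : Nat → Nat → Bool :=
  fun a b => decide (i < (a : Int) ∨ ((a : Int) = i ∧ (b : Int) < u))
def pvFillOut (t : Int) : Nat → Nat → Bool := fun a _ => decide (t < (a : Int))

theorem pvReads (s : String) (n kn : Nat) (i u : Int)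
    (hi0 : 0 ≤ i) (hik : i < (kn : Int)) (hku : (kn : Int) < u) (hun : u < (n : Int))
    (m : List (List (Option String))) (hm : pvPic s.toList n kn (pvFillIn i u) m) :
    pvCell m (i + 1) (u - 1) = some (pvVal s.toList kn (i.toNat + 1) (u.toNat - 1)) ∧
    pvCell m i (u - 1) = some (pvVal s.toList kn i.toNat (u.toNat - 1)) ∧
    pvCell m (i + 1) u = some (pvVal s.toList kn (i.toNat + 1) u.toNat) ∧
    pvCell m i u = none := by
  have e1 : (i + 1).toNat = i.toNat + 1 := by omega
  have e2 : (u - 1).toNat = u.toNat - 1 := by omega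
  refine ⟨?_, ?_, ?_, ?_⟩
  · rw [pvCell_eq _ _ _ (by omega) (by omega), e1, e2]
    refine pvPic_read _ _ _ _ _ hm _ _ (by omega) (by omega) ?_
    by_cases hb1 : i.toNat + 1 = kn
    · exact Or.inl hb1
    · by_cases hb2 : u.toNat - 1 = kn
      · exact Or.inr (Or.inl hb2)
      · refine Or.inr (Or.inr ⟨by omega, by omega, ?_⟩)
        simp only [pvFillIn, decide_eq_true_eq]
        omega
  · rw [pvCell_eq _ _ _ (by omega) (by omega), e2]
    refine pvPic_read _ _ _ _ _ hm _ _ (by omega) (by omega) ?_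
    by_cases hb2 : u.toNat - 1 = kn
    · exact Or.inr (Or.inl hb2)
    · refine Or.inr (Or.inr ⟨by omega, by omega, ?_⟩)
      simp only [pvFillIn, decide_eq_true_eq]
      omega
  · rw [pvCell_eq _ _ _ (by omega) (by omega), e1]
    refine pvPic_read _ _ _ _ _ hm _ _ (by omega) (by omega) ?_
    by_cases hb1 : i.toNat + 1 = kn
    · exact Or.inl hb1
    · refine Or.inr (Or.inr ⟨by omega, by omega, ?_⟩)
      simp only [pvFillIn, decide_eq_true_eq]
      omega
  · rw [pvCell_eq _ _ _ (by omega) (by omega)]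
    refine pvPic_none _ _ _ _ _ hm _ _ (by omega) (by omega) (by omega) ?_
    simp only [pvFillIn, decide_eq_true_eq]
    omega

theorem pvPic_after_set (s : String) (n kn : Nat) (i u : Int)
    (hi0 : 0 ≤ i) (hik : i < (kn : Int)) (hku : (kn : Int) < u) (hun : u < (n : Int))
    (m : List (List (Option String))) (hm : pvPic s.toList n kn (pvFillIn i u) m) :
    pvPic s.toList n kn (pvFillIn i (u + 1))
      (pvSet2 m i.toNat u.toNat (some (pvVal s.toList kn i.toNat u.toNat))) := by
  obtain ⟨hlen, hrows, hget⟩ := hm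
  refine ⟨by rw [pvSet2_length, hlen], pvSet2_rows _ _ _ _ n hrows (by omega),
    fun a b ha hb => ?_⟩
  rw [pvGet2_pvSet2 _ _ _ _ _ _ n hrows (by omega) (by omega)]
  by_cases hab : a = i.toNat ∧ b = u.toNat
  · have hfi : pvFillIn i (u + 1) a b = true := by
      simp only [pvFillIn, decide_eq_true_eq]
      omega
    rw [if_pos hab, hab.1, hab.2, if_neg (by omega),
      if_pos ⟨by omega, by omega, by rw [← hab.1, ← hab.2]; exact hfi⟩]
  · rw [if_neg hab, hget a b ha hb]
    by_cases hbase : a = kn ∨ b = kn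
    · rw [if_pos hbase, if_pos hbase]
    · rw [if_neg hbase, if_neg hbase]
      have hfill : (pvFillIn i u a b = true) ↔ (pvFillIn i (u + 1) a b = true) := by
        simp only [pvFillIn, decide_eq_true_eq]
        omega
      by_cases hreg : a < kn ∧ kn < b ∧ pvFillIn i u a b = true
      · rw [if_pos hreg, if_pos ⟨hreg.1, hreg.2.1, hfill.1 hreg.2.2⟩]
      · rw [if_neg hreg, if_neg (by rw [← hfill] at *; tauto)]

theorem pvStepA (s : String) (n kn : Nat) (i u : Int)
    (hi0 : 0 ≤ i) (hik : i < (kn : Int)) (hku : (kn : Int) < u) (hun : u < (n : Int))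
    (m : List (List (Option String))) (hm : pvPic s.toList n kn (pvFillIn i u) m) :
    (if pvChar s i = pvChar s u then
      pvSetCell m i u (some (pvChar s i ++ pvCellStr m (i + 1) (u - 1) ++ pvChar s u))
    else
      if PySem.Str.len (pvCellStr m i (u - 1)) > PySem.Str.len (pvCellStr m (i + 1) u) then
        pvSetCell m i u (some (pvCellStr m i (u - 1)))
      else
        pvSetCell m i u (some (pvCellStr m (i + 1) u)))
    = pvSet2 m i.toNat u.toNat (some (pvVal s.toList kn i.toNat u.toNat)) := by
  obtain ⟨hc1, hc2, hc3, -⟩ := pvReads s n kn i u hi0 hik hku hun m hm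
  have hr1 : pvCellStr m (i + 1) (u - 1) = pvVal s.toList kn (i.toNat + 1) (u.toNat - 1) := by
    unfold pvCellStr; rw [hc1]; rfl
  have hr2 : pvCellStr m i (u - 1) = pvVal s.toList kn i.toNat (u.toNat - 1) := by
    unfold pvCellStr; rw [hc2]; rfl
  have hr3 : pvCellStr m (i + 1) u = pvVal s.toList kn (i.toNat + 1) u.toNat := by
    unfold pvCellStr; rw [hc3]; rfl
  rw [hr1, hr2, hr3, pvChar_eq _ _ (by omega), pvChar_eq _ _ (by omega),
    pvSetCell_eq _ _ _ _ (by omega) (by omega), pvSetCell_eq _ _ _ _ (by omega) (by omega),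
    pvSetCell_eq _ _ _ _ (by omega) (by omega),
    pvVal_region s.toList kn i.toNat u.toNat (by omega) (by omega)]
  split_ifs <;> rfl

theorem pvSolve_memo (s : String) (fuel : Nat) (m : List (List (Option String))) (i j : Int)
    (v : String) (h : pvCell m i j = some v) :
    pvSolve s (fuel + 1) m i j = (v, m) := by
  unfold pvSolve
  rw [h]

theorem pvStepB (s : String) (n kn : Nat) (i u : Int) (f : Nat)
    (hi0 : 0 ≤ i) (hik : i < (kn : Int)) (hku : (kn : Int) < u) (hun : u < (n : Int))
    (m : List (List (Option String))) (hm : pvPic s.toList n kn (pvFillIn i u) m) :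
    pvSolve s (f + 2) m i u =
      (pvVal s.toList kn i.toNat u.toNat,
       pvSet2 m i.toNat u.toNat (some (pvVal s.toList kn i.toNat u.toNat))) := by
  obtain ⟨hc1, hc2, hc3, hc4⟩ := pvReads s n kn i u hi0 hik hku hun m hm
  have hcell : pvCell m i u = none := hc4
  show (match pvCell m i u with
    | some v => (v, m)
    | none =>
      if pvChar s i = pvChar s u then
        let r := pvSolve s (f + 1) m (i + 1) (u - 1)
        let res := pvChar s i ++ r.1 ++ pvChar s u
        (res, pvSetCell r.2 i u (some res))
      else
        let a := pvSolve s (f + 1) m i (u - 1)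
        let b := pvSolve s (f + 1) a.2 (i + 1) u
        let res := if PySem.Str.len a.1 > PySem.Str.len b.1 then a.1 else b.1
        (res, pvSetCell b.2 i u (some res))) = _
  rw [hcell]
  rw [pvSolve_memo s f m (i + 1) (u - 1) _ hc1, pvSolve_memo s f m i (u - 1) _ hc2]
  dsimp only
  rw [pvSolve_memo s f m (i + 1) u _ hc3]
  dsimp only
  rw [pvChar_eq _ _ (by omega : (0:Int) ≤ i), pvChar_eq _ _ (by omega : (0:Int) ≤ u),
    pvSetCell_eq _ _ _ _ (by omega) (by omega),
    pvVal_region s.toList kn i.toNat u.toNat (by omega) (by omega)]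
  split_ifs <;> first | rfl | rw [pvSetCell_eq _ _ _ _ (by omega) (by omega)]

theorem pvInner (s : String) (n kn : Nat) (hn : n = s.toList.length) (i : Int)
    (hi0 : 0 ≤ i) (hik : i < (kn : Int)) (hknn : kn < n) (fuel : Nat) :
    ∀ (u : Int) (m : List (List (Option String))),
      ((n : Int) - u).toNat ≤ fuel → (kn : Int) < u → u ≤ (n : Int) →
      pvPic s.toList n kn (pvFillIn i u) m →
      ((PySem.List.pyRange u (n : Int) 1).foldl (fun m j =>
          if pvChar s i = pvChar s j then
            pvSetCell m i j (some (pvChar s i ++ pvCellStr m (i + 1) (j - 1) ++ pvChar s j))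
          else
            if PySem.Str.len (pvCellStr m i (j - 1)) > PySem.Str.len (pvCellStr m (i + 1) j) then
              pvSetCell m i j (some (pvCellStr m i (j - 1)))
            else
              pvSetCell m i j (some (pvCellStr m (i + 1) j))) m)
      = ((PySem.List.pyRange u (n : Int) 1).foldl
          (fun m j => (pvSolve s s.toList.length m i j).2) m)
      ∧ pvPic s.toList n kn (pvFillIn i (n : Int))
          ((PySem.List.pyRange u (n : Int) 1).foldl (fun m j =>
            if pvChar s i = pvChar s j then
              pvSetCell m i j (some (pvChar s i ++ pvCellStr m (i + 1) (j - 1) ++ pvChar s j))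
            else
              if PySem.Str.len (pvCellStr m i (j - 1)) > PySem.Str.len (pvCellStr m (i + 1) j) then
                pvSetCell m i j (some (pvCellStr m i (j - 1)))
              else
                pvSetCell m i j (some (pvCellStr m (i + 1) j))) m) := by
  induction fuel with
  | zero =>
    intro u m hfuel hku hun hm
    rw [PySem.List.pyRange_one_eq_nil (by omega), List.foldl_nil]
    refine ⟨rfl, ?_⟩
    have he : u = (n : Int) := by omega
    rwa [he] at hm
  | succ f ih =>
    intro u m hfuel hku hun hm
    by_cases hend : (n : Int) ≤ u
    · rw [PySem.List.pyRange_one_eq_nil hend, List.foldl_nil]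
      refine ⟨rfl, ?_⟩
      have he : u = (n : Int) := by omega
      rwa [he] at hm
    · rw [PySem.List.pyRange_one_cons (by omega), List.foldl_cons, List.foldl_cons]
      have hA := pvStepA s n kn i u hi0 hik hku (by omega) m hm
      obtain ⟨f2, hf2⟩ : ∃ f2, s.toList.length = f2 + 2 := ⟨s.toList.length - 2, by omega⟩
      have hB := pvStepB s n kn i u f2 hi0 hik hku (by omega) m hm
      have hBacc : (pvSolve s s.toList.length m i u).2
          = pvSet2 m i.toNat u.toNat (some (pvVal s.toList kn i.toNat u.toNat)) := by
        rw [hf2, hB]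
      rw [hA, hBacc]
      have hpic := pvPic_after_set s n kn i u hi0 hik hku (by omega) m hm
      exact ih (u + 1) _ (by omega) (by omega) (by omega) hpic

theorem pvOuter (s : String) (k : Int) (n kn : Nat)
    (hk : k = (kn : Int)) (hknn : kn < n) (hn : n = s.toList.length) (fuel : Nat) :
    ∀ (t : Int) (m : List (List (Option String))),
      (t + 1).toNat ≤ fuel → t < (kn : Int) →
      pvPic s.toList n kn (pvFillOut t) m →
      ((PySem.List.pyRange t (-1) (-1)).foldl (fun m i =>
        (PySem.List.pyRange (k + 1) (n : Int) 1).foldl (fun m j =>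
          if pvChar s i = pvChar s j then
            pvSetCell m i j (some (pvChar s i ++ pvCellStr m (i + 1) (j - 1) ++ pvChar s j))
          else
            if PySem.Str.len (pvCellStr m i (j - 1)) > PySem.Str.len (pvCellStr m (i + 1) j) then
              pvSetCell m i j (some (pvCellStr m i (j - 1)))
            else
              pvSetCell m i j (some (pvCellStr m (i + 1) j))) m) m)
      = ((PySem.List.pyRange t (-1) (-1)).foldl (fun m i =>
          (PySem.List.pyRange (k + 1) (n : Int) 1).foldl
            (fun m j => (pvSolve s s.toList.length m i j).2) m) m) := by
  induction fuel with
  | zero =>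
    intro t m hfuel ht hm
    rw [PySem.List.pyRange_neg_one_eq_nil (by omega), List.foldl_nil, List.foldl_nil]
  | succ f ih =>
    intro t m hfuel ht hm
    by_cases hend : t ≤ -1
    · rw [PySem.List.pyRange_neg_one_eq_nil (by omega), List.foldl_nil, List.foldl_nil]
    · rw [PySem.List.pyRange_neg_one_cons (by omega), List.foldl_cons, List.foldl_cons]
      have hpic0 : pvPic s.toList n kn (pvFillIn t (k + 1)) m := by
        refine pvPic_congr _ _ _ _ _ _ (fun a b ha hb hak hkb => ?_) hm
        simp only [pvFillOut, pvFillIn]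
        rw [decide_eq_decide]
        omega
      have hinner := pvInner s n kn hn t (by omega) (by omega) hknn
        (((n : Int) - (k + 1)).toNat) (k + 1) m (by omega) (by omega) (by omega) hpic0
      obtain ⟨heq, hpic1⟩ := hinner
      rw [← heq]
      have hpic2 := pvPic_congr s.toList n kn (pvFillIn t (n : Int)) (pvFillOut (t - 1)) _
        (fun a b ha hb hak hkb => by
          simp only [pvFillOut, pvFillIn]
          rw [decide_eq_decide]
          omega) hpic1
      exact ih (t - 1) _ (by omega) (by omega) hpic2

-- ===== VERDICT (by name: the statement is the Claim_ definition above) =====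
theorem lcs_bu_spec : Claim_equal_lcs_bu := by
  intro s k hdom hpre
  unfold Spec_lcs_bu
  simp only [lcs_bu, lcs_bu_alt]
  by_cases hk0 : k ≤ 0
  · rw [PySem.List.pyRange_neg_one_eq_nil (by omega : k - 1 ≤ (-1 : Int))]
    rfl
  · by_cases hbig : (s.toList.length : Int) ≤ k + 1
    · simp only [PySem.List.pyRange_one_eq_nil hbig, List.foldl_nil]
    · have hkn : k < (s.toList.length : Int) := by
        rcases hpre with h | h
        · omega
        · exact h.2
      have hbase := pvBase_loop s k s.toList.length k.toNat (by omega) (by omega)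
        s.toList.length 0 _ (by omega) (by omega) (by omega)
        (pvBase_start s.toList s.toList.length k.toNat)
      have hpic0 := pvBase_to_pic s.toList s.toList.length k.toNat _ hbase
      have hpicOut := pvPic_congr s.toList s.toList.length k.toNat (fun _ _ => false)
        (pvFillOut (k - 1)) _
        (fun a b ha hb hak hkb => by
          simp only [pvFillOut]
          rw [eq_comm]
          exact decide_eq_false (by omega)) hpic0
      exact pvOuter s k s.toList.length k.toNat (by omega) (by omega) rfl
        ((k - 1 + 1).toNat) (k - 1) _ (by omega) (by omega) hpicOut
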